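-- pv_equiv track=rewrite | github.com/sebastianardelean/hqago | qgamho_knapsack_grover_improved.py | recreate_individual
-- ===== SOURCE A (Python) =====
-- METAHEURISTIC_GENE_LENGTH:int = 4
--
-- NO_OF_QUBITS_INDIVIDUAL = 5
--
-- def recreate_individual(individual_mho, individual_binary):
--     solution = [(0,False) for _ in range(0,NO_OF_QUBITS_INDIVIDUAL)]
--     if METAHEURISTIC_GENE_LENGTH == 0:
--         return individual_binary
--     for gene in individual_mho:
--         position=abs(gene)-1
--         if gene>0:
--             new_value = (1,True)
--             solution[position]=new_value
--         else:
--             new_value = (0, True)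
--             solution[position]=new_value
--     for gene in individual_binary:
--         for i in range(0,len(solution)):
--             value = solution[i]
--             if value[1]==False:
--                 new_value = (gene,True)
--                 solution[i]=new_value
--                 break
--     return list(map(lambda x: x[0], solution))
-- ===== SOURCE B (Python) =====
-- METAHEURISTIC_GENE_LENGTH: int = 4
--
-- NO_OF_QUBITS_INDIVIDUAL = 5
--
-- def recreate_individual(individual_mho, individual_binary):
--     if METAHEURISTIC_GENE_LENGTH == 0:
--         return individual_binary
--     values = [0] * NO_OF_QUBITS_INDIVIDUAL
--     filled = [False] * NO_OF_QUBITS_INDIVIDUAL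
--     for gene in individual_mho:
--         pos = abs(gene) - 1
--         values[pos] = 1 if gene > 0 else 0
--         filled[pos] = True
--     unfilled = [i for i, fl in enumerate(filled) if not fl]
--     for gene, i in zip(individual_binary, unfilled):
--         values[i] = gene
--     return values
-- ===== Notes on version B (the rewrite author's own statement) =====
-- stated objective: simpler
-- what changed: Replaces the single list of (value,filled) tuples and the nested rescan of all slots per binary gene with two parallel arrays and a precomputed list of unfilled indices that is consumed in one zip pass.
import Mathlib
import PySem

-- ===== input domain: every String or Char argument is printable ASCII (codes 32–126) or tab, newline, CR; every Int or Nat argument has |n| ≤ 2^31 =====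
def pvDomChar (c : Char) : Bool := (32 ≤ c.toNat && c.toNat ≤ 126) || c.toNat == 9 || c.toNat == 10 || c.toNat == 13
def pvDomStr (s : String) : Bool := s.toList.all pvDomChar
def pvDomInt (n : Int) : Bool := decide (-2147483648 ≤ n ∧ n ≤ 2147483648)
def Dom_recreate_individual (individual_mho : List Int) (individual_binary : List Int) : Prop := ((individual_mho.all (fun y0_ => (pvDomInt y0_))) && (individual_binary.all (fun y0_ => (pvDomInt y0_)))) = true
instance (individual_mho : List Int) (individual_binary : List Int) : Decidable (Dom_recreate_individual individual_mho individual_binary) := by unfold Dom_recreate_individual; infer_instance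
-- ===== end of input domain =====

-- B replaces A's single list of (value,filled) tuples and its per-binary-gene rescan of all
-- slots by two parallel arrays and one zip pass over the precomputed unfilled indices (simpler).

-- ===== PORT A =====
-- inner 'for i in range(0,len(solution)): … break' loop of A, transliterated as recursion on i
def pvFillIdx (gene : Int) (sol : List (Int × Bool)) (i : Nat) : List (Int × Bool) :=
  if h : i < sol.length then
    let value := sol[i]
    if value.2 = false then sol.set i (gene, true)
    else pvFillIdx gene sol (i + 1)
  else sol
termination_by sol.length - i

def recreate_individual (individual_mho : List Int) (individual_binary : List Int) : List Int :=
  let solution : List (Int × Bool) := List.replicate 5 (0, false)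
  if (4 : Int) = 0 then individual_binary
  else
    let solution := individual_mho.foldl (fun sol gene =>
      let position : Int := |gene| - 1
      if gene > 0 then PySem.List.pySetD sol position (1, true)
      else PySem.List.pySetD sol position (0, true)) solution
    let solution := individual_binary.foldl (fun sol gene => pvFillIdx gene sol 0) solution
    solution.map (fun x => x.1)

-- ===== PORT B =====
def recreate_individual_alt (individual_mho : List Int) (individual_binary : List Int) : List Int :=
  if (4 : Int) = 0 then individual_binary
  else
    let vf := individual_mho.foldl (fun (vf : List Int × List Bool) gene =>
      let pos : Int := |gene| - 1
      (PySem.List.pySetD vf.1 pos (if gene > 0 then 1 else 0),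
       PySem.List.pySetD vf.2 pos true))
      (List.replicate 5 0, List.replicate 5 false)
    let unfilled : List Int := (PySem.List.enumerate vf.2).filterMap
      (fun p => if p.2 then none else some p.1)
    (individual_binary.zip unfilled).foldl
      (fun v p => PySem.List.pySetD v p.2 p.1) vf.1

-- ===== PRECONDITION & SPEC =====
-- Pre_ excludes exactly the inputs where A raises IndexError: a metaheuristic gene with
-- |gene| > 5 makes 'solution[abs(gene)-1]' an out-of-range index for the 5-element list.
def Pre_recreate_individual (individual_mho : List Int) (individual_binary : List Int) : Prop :=
  ∀ g ∈ individual_mho, g.natAbs ≤ 5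
instance (individual_mho : List Int) (individual_binary : List Int) : Decidable (Pre_recreate_individual individual_mho individual_binary) := by unfold Pre_recreate_individual; infer_instance

def pvWitness_recreate_individual : List Int × List Int := ([3, -1, 0], [1, 0, 1])

def Spec_recreate_individual (individual_mho : List Int) (individual_binary : List Int) (out : List Int) : Prop := out = recreate_individual_alt individual_mho individual_binary
instance (individual_mho : List Int) (individual_binary : List Int) (out : List Int) : Decidable (Spec_recreate_individual individual_mho individual_binary out) := by unfold Spec_recreate_individual; infer_instance

-- ===== CLAIM (what is proved, stated in full; the proofs are below) =====
def Claim_equal_recreate_individual : Prop := ∀ (individual_mho : List Int) (individual_binary : List Int), Dom_recreate_individual individual_mho individual_binary → Pre_recreate_individual individual_mho individual_binary → Spec_recreate_individual individual_mho individual_binary (recreate_individual individual_mho individual_binary)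

-- ===== LEMMAS AND PROOFS =====

-- structural characterisation of A's inner break-loop: replace the first unfilled slot
def pvFillFirst (g : Int) : List (Int × Bool) → List (Int × Bool)
  | [] => []
  | x :: xs => if x.2 then x :: pvFillFirst g xs else (g, true) :: xs

-- B's unfilled-index list, with explicit start offset
def pvUnf (f : List Bool) (s : Int) : List Int :=
  (PySem.List.enumerate f s).filterMap (fun p => if p.2 then none else some p.1)

theorem pvFillIdx_eq (g : Int) (sol : List (Int × Bool)) (i : Nat) :
    pvFillIdx g sol i = sol.take i ++ pvFillFirst g (sol.drop i) := by
  induction i using pvFillIdx.induct (sol := sol) with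
  | case1 x h value hv =>
    rw [pvFillIdx, dif_pos h]
    rw [if_pos hv, List.set_eq_take_append_cons_drop, if_pos h,
        List.drop_eq_getElem_cons h]
    have hv' : sol[x].2 = false := hv
    simp [pvFillFirst, hv']
  | case2 x h value hv ih =>
    rw [pvFillIdx, dif_pos h]
    rw [if_neg hv, ih, List.drop_eq_getElem_cons h]
    simp only [pvFillFirst]
    rw [if_pos (by simpa using hv)]
    have ht : List.take (x + 1) sol = List.take x sol ++ [sol[x]] := by
      rw [List.take_add_one, List.getElem?_eq_getElem h]; rfl
    rw [ht, List.append_assoc]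
    rfl
  | case3 x h =>
    rw [pvFillIdx, dif_neg h]
    have hl : sol.length ≤ x := Nat.le_of_not_lt h
    simp [List.take_of_length_le hl, List.drop_eq_nil_of_le hl, pvFillFirst]

theorem pvFillIdx_zero (g : Int) (sol : List (Int × Bool)) :
    pvFillIdx g sol 0 = pvFillFirst g sol := by
  simp [pvFillIdx_eq]

theorem pvFold_fill_nil (l : List Int) :
    l.foldl (fun s g => pvFillFirst g s) [] = [] := by
  induction l with
  | nil => rfl
  | cons g l ih => simpa [pvFillFirst] using ih

theorem pvFold_fill_head (l : List Int) (a : Int) (t : List (Int × Bool)) :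
    l.foldl (fun s g => pvFillFirst g s) ((a, true) :: t)
      = (a, true) :: l.foldl (fun s g => pvFillFirst g s) t := by
  induction l generalizing t with
  | nil => rfl
  | cons g l ih => simpa [pvFillFirst] using ih (pvFillFirst g t)

theorem pvUnf_nil (s : Int) : pvUnf [] s = [] := by
  simp [pvUnf, PySem.List.enumerate_nil]

theorem pvUnf_cons (b : Bool) (f : List Bool) (s : Int) :
    pvUnf (b :: f) s = if b then pvUnf f (s + 1) else s :: pvUnf f (s + 1) := by
  cases b <;> simp [pvUnf, PySem.List.enumerate_cons]

theorem pvUnf_shift (f : List Bool) (s : Int) :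
    pvUnf f (s + 1) = (pvUnf f s).map (fun i => i + 1) := by
  induction f generalizing s with
  | nil => simp [pvUnf_nil]
  | cons b f ih =>
    cases b <;> simp [pvUnf_cons, ih (s + 1), ih s]

theorem pvUnf_nonneg (f : List Bool) (s : Int) : ∀ i ∈ pvUnf f s, s ≤ i := by
  induction f generalizing s with
  | nil => simp [pvUnf_nil]
  | cons b f ih =>
    intro i hi
    rw [pvUnf_cons] at hi
    cases b with
    | true =>
      simp only [if_pos] at hi
      have := ih (s + 1) i hi; omega
    | false =>
      have hi' : i = s ∨ i ∈ pvUnf f (s + 1) := by simpa using hi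
      rcases hi' with rfl | hi'
      · omega
      · have := ih (s + 1) i hi'; omega

theorem pvAssign_shift (l : List Int) (u : List Int) (v : List Int) (a : Int)
    (hu : ∀ i ∈ u, 0 ≤ i) :
    (l.zip (u.map (fun i => i + 1))).foldl (fun v p => PySem.List.pySetD v p.2 p.1) (a :: v)
      = a :: (l.zip u).foldl (fun v p => PySem.List.pySetD v p.2 p.1) v := by
  induction l generalizing u v with
  | nil => simp
  | cons g l ih =>
    cases u with
    | nil => simp
    | cons i u =>
      have h0 : (0 : Int) ≤ i := hu i (by simp)
      simp only [List.map_cons, List.zip_cons_cons, List.foldl_cons]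
      rw [PySem.List.pySetD_of_nonneg _ _ (by omega : (0:Int) ≤ i + 1),
          PySem.List.pySetD_of_nonneg _ _ h0]
      have ht : (i + 1).toNat = i.toNat + 1 := by omega
      rw [ht, List.set_cons_succ]
      exact ih u (v.set i.toNat g) (fun j hj => hu j (by simp [hj]))

theorem pvZip_set {α β : Type} : ∀ (v : List α) (f : List β) (k : Nat) (x : α) (y : β),
    (v.zip f).set k (x, y) = (v.set k x).zip (f.set k y) := by
  intro v
  induction v with
  | nil => intro f k x y; simp
  | cons a v ih =>
    intro f k x y
    cases f with
    | nil => simp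
    | cons b f =>
      cases k with
      | zero => simp
      | succ k => simp [ih]

theorem pvZip_pySetD (v : List Int) (f : List Bool) (h : v.length = f.length)
    (i : Int) (x : Int) (y : Bool) :
    PySem.List.pySetD (v.zip f) i (x, y)
      = (PySem.List.pySetD v i x).zip (PySem.List.pySetD f i y) := by
  unfold PySem.List.pySetD PySem.List.pySet?
  have hz : (v.zip f).length = v.length := by simp [h]
  rw [hz, ← h]
  cases hk : PySem.List.pyIdx? v.length i with
  | none => simp
  | some k => simp [pvZip_set]

-- A's metaheuristic loop on the zipped state equals B's loop on the two parallel arrays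
theorem pvMho_zip : ∀ (mho : List Int) (v : List Int) (f : List Bool),
    v.length = f.length →
    mho.foldl (fun sol gene =>
        if gene > 0 then PySem.List.pySetD sol (|gene| - 1) ((1 : Int), true)
        else PySem.List.pySetD sol (|gene| - 1) ((0 : Int), true)) (v.zip f)
      = (mho.foldl (fun (vf : List Int × List Bool) gene =>
          (PySem.List.pySetD vf.1 (|gene| - 1) (if gene > 0 then 1 else 0),
           PySem.List.pySetD vf.2 (|gene| - 1) true)) (v, f)).1.zip
        (mho.foldl (fun (vf : List Int × List Bool) gene =>
          (PySem.List.pySetD vf.1 (|gene| - 1) (if gene > 0 then 1 else 0),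
           PySem.List.pySetD vf.2 (|gene| - 1) true)) (v, f)).2 := by
  intro mho
  induction mho with
  | nil => intro v f h; rfl
  | cons g mho ih =>
    intro v f h
    simp only [List.foldl_cons]
    have hlen : (PySem.List.pySetD v (|g| - 1) (if g > 0 then 1 else 0)).length
        = (PySem.List.pySetD f (|g| - 1) true).length := by
      simp [PySem.List.length_pySetD, h]
    by_cases hg : g > 0
    · rw [if_pos hg, pvZip_pySetD v f h, if_pos hg]
      exact ih _ _ (by simp [PySem.List.length_pySetD, h])
    · rw [if_neg hg, pvZip_pySetD v f h, if_neg hg]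
      exact ih _ _ (by simp [PySem.List.length_pySetD, h])

-- lengths are preserved by B's metaheuristic loop
theorem pvMho_len (mho : List Int) (v : List Int) (f : List Bool) :
    (mho.foldl (fun (vf : List Int × List Bool) gene =>
        (PySem.List.pySetD vf.1 (|gene| - 1) (if gene > 0 then 1 else 0),
         PySem.List.pySetD vf.2 (|gene| - 1) true)) (v, f)).1.length = v.length ∧
    (mho.foldl (fun (vf : List Int × List Bool) gene =>
        (PySem.List.pySetD vf.1 (|gene| - 1) (if gene > 0 then 1 else 0),
         PySem.List.pySetD vf.2 (|gene| - 1) true)) (v, f)).2.length = f.length := by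
  induction mho generalizing v f with
  | nil => exact ⟨rfl, rfl⟩
  | cons g mho ih =>
    simp only [List.foldl_cons]
    simpa [PySem.List.length_pySetD] using ih (PySem.List.pySetD v (|g| - 1) (if g > 0 then 1 else 0)) (PySem.List.pySetD f (|g| - 1) true)

-- A's binary phase (fill first unfilled slot per gene) equals B's one zip pass
theorem pvPhase2 : ∀ (f : List Bool) (v : List Int) (l : List Int),
    v.length = f.length →
    ((l.foldl (fun sol gene => pvFillFirst gene sol) (v.zip f)).map (fun x => x.1))
      = (l.zip (pvUnf f 0)).foldl (fun v p => PySem.List.pySetD v p.2 p.1) v := by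
  intro f
  induction f with
  | nil =>
    intro v l h
    rw [List.length_nil] at h
    rw [List.eq_nil_of_length_eq_zero h]
    simp [pvFold_fill_nil, pvUnf_nil]
  | cons b f ih =>
    intro v l h
    cases v with
    | nil => simp at h
    | cons a v =>
      simp only [List.length_cons, Nat.succ_inj] at h
      cases b with
      | true =>
        rw [List.zip_cons_cons, pvFold_fill_head, List.map_cons, ih v l h]
        rw [pvUnf_cons, if_pos rfl, show (0:Int) + 1 = 0 + 1 from rfl, pvUnf_shift]
        rw [pvAssign_shift l _ v a (pvUnf_nonneg f 0)]
      | false =>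
        cases l with
        | nil =>
          simp only [List.foldl_nil, List.zip_nil_left]
          simpa using List.map_fst_zip (l₁ := a :: v) (l₂ := false :: f) (by simp [h])
        | cons g l =>
          rw [List.zip_cons_cons, List.foldl_cons]
          have : pvFillFirst g ((a, false) :: v.zip f) = (g, true) :: v.zip f := by
            simp [pvFillFirst]
          rw [this, pvFold_fill_head, List.map_cons, ih v l h]
          rw [pvUnf_cons, if_neg (by simp), show (0:Int) + 1 = 0 + 1 from rfl, pvUnf_shift]
          rw [List.zip_cons_cons, List.foldl_cons]
          rw [PySem.List.pySetD_of_nonneg _ _ (by omega : (0:Int) ≤ 0)]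
          rw [show ((0:Int)).toNat = 0 from rfl, List.set_cons_zero]
          rw [pvAssign_shift l _ v g (pvUnf_nonneg f 0)]

theorem pvZip_replicate {α β : Type} (a : α) (b : β) : ∀ (n : Nat),
    (List.replicate n a).zip (List.replicate n b) = List.replicate n (a, b) := by
  intro n
  induction n with
  | zero => rfl
  | succ n ih => simp [List.replicate_succ, ih]

-- ===== VERDICT (by name: the statement is the Claim_ definition above) =====
theorem recreate_individual_spec : Claim_equal_recreate_individual := by
  intro mho bin _dom _pre
  unfold Spec_recreate_individual
  show ((bin.foldl (fun sol gene => pvFillIdx gene sol 0)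
          (mho.foldl (fun sol gene =>
            if gene > 0 then PySem.List.pySetD sol (|gene| - 1) ((1 : Int), true)
            else PySem.List.pySetD sol (|gene| - 1) ((0 : Int), true))
            (List.replicate 5 ((0 : Int), false)))).map (fun x => x.1))
      = (bin.zip ((PySem.List.enumerate (mho.foldl (fun (vf : List Int × List Bool) gene =>
            (PySem.List.pySetD vf.1 (|gene| - 1) (if gene > 0 then 1 else 0),
             PySem.List.pySetD vf.2 (|gene| - 1) true))
            (List.replicate 5 (0 : Int), List.replicate 5 false)).2).filterMap
              (fun p => if p.2 then none else some p.1))).foldl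
          (fun v p => PySem.List.pySetD v p.2 p.1)
          (mho.foldl (fun (vf : List Int × List Bool) gene =>
            (PySem.List.pySetD vf.1 (|gene| - 1) (if gene > 0 then 1 else 0),
             PySem.List.pySetD vf.2 (|gene| - 1) true))
            (List.replicate 5 (0 : Int), List.replicate 5 false)).1
  rw [← pvZip_replicate (0 : Int) false 5]
  rw [pvMho_zip mho _ _ (by simp)]
  have hfun : (fun (sol : List (Int × Bool)) (gene : Int) => pvFillIdx gene sol 0)
      = fun sol gene => pvFillFirst gene sol := by
    funext sol gene; exact pvFillIdx_zero gene sol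
  rw [hfun]
  have hlen := pvMho_len mho (List.replicate 5 (0 : Int)) (List.replicate 5 false)
  rw [pvPhase2 _ _ bin (by rw [hlen.1, hlen.2]; simp)]
  rfl
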